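-- pv_equiv track=rewrite | github.com/maxbergmark/misc-scripts | codegolf/pronounciation_sort.py | get_pronounce
-- ===== SOURCE A (Python) =====
-- def get_pronounce(n):
-- 	if n < 0:
-- 		return "minus " + get_pronounce(-n)
-- 	words = []
-- 	digits = ["zero", "one", "two", "three", "four",
-- 		"five", "six", "seven", "eight", "nine"]
-- 	for digit in str(n):
-- 		words.append(digits[int(digit)])
-- 	return ' '.join(words)
-- ===== SOURCE B (Python) =====
-- def get_pronounce(n):
-- 	if n < 0:
-- 		return "minus " + get_pronounce(-n)
-- 	if n == 0:
-- 		return "zero"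
-- 	digits = ["zero", "one", "two", "three", "four",
-- 		"five", "six", "seven", "eight", "nine"]
-- 	words = []
-- 	while n:
-- 		words.append(digits[n % 10])
-- 		n //= 10
-- 	return ' '.join(reversed(words))
-- ===== Notes on version B (the rewrite author's own statement) =====
-- stated objective: alternative
-- what changed: B extracts digits arithmetically (n % 10, n //= 10) least-significant-first and joins the reversed word list, instead of iterating over the characters of str(n); zero is a direct special case.
import Mathlib
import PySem

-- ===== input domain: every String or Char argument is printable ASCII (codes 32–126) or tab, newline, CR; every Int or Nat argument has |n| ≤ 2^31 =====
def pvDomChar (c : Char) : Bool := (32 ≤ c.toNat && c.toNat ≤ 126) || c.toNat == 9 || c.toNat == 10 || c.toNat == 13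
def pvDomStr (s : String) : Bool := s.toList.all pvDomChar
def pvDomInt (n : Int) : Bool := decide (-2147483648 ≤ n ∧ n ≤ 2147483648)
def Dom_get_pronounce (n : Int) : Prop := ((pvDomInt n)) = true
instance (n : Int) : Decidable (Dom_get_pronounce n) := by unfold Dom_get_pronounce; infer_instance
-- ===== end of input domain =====

-- B spells the number by peeling digits arithmetically (n % 10, n //= 10) and reversing,
-- instead of A's iteration over the characters of str(n); same return value for every int.

-- the digit→word table both Pythons carry as a literal list
def pvDigitWords : List (List Char) :=
  ["zero".toList, "one".toList, "two".toList, "three".toList, "four".toList,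
   "five".toList, "six".toList, "seven".toList, "eight".toList, "nine".toList]

-- ===== PORT A =====
-- int(digit) is ported as (PySem.Int.ofChars? [c]).getD 0: exact here, since every
-- character of str(n) for n ≥ 0 is a decimal digit (ofChars? returns some);
-- digits[...] likewise via pyGetD (the index is always 0..9, never an IndexError).
def get_pronounce (n : Int) : String :=
  if n < 0 then
    String.ofList ("minus ".toList ++ (get_pronounce (-n)).toList)
  else
    String.ofList (PySem.Chars.join [' ']
      ((PySem.Int.toChars n).foldl
        (fun words c =>
          words ++ [PySem.List.pyGetD pvDigitWords ((PySem.Int.ofChars? [c]).getD 0) []]) []))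
termination_by (if n < 0 then 1 else 0)
decreasing_by simp_all; omega

-- ===== PORT B =====
-- the while-loop of Source B: collects words least-significant digit first
def pvPeel (n : Int) : List (List Char) :=
  if 0 < n then
    PySem.List.pyGetD pvDigitWords (PySem.Int.mod n 10) [] :: pvPeel (PySem.Int.floordiv n 10)
  else []
termination_by n.toNat
decreasing_by
  rw [PySem.Int.floordiv_eq_ediv_of_pos (by omega)]
  omega

def get_pronounce_alt (n : Int) : String :=
  if n < 0 then
    String.ofList ("minus ".toList ++ (get_pronounce_alt (-n)).toList)
  else if n = 0 then "zero"
  else String.ofList (PySem.Chars.join [' '] (pvPeel n).reverse)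
termination_by (if n < 0 then 1 else 0)
decreasing_by simp_all; omega

-- ===== PRECONDITION & SPEC =====
def Spec_get_pronounce (n : Int) (out : String) : Prop := out = get_pronounce_alt n
instance (n : Int) (out : String) : Decidable (Spec_get_pronounce n out) := by unfold Spec_get_pronounce; infer_instance

-- ===== CLAIM (what is proved, stated in full; the proofs are below) =====
def Claim_equal_get_pronounce : Prop := ∀ (n : Int), Dom_get_pronounce n → Spec_get_pronounce n (get_pronounce n)

-- ===== LEMMAS AND PROOFS =====

-- A's per-character word function
def pvWordOf (c : Char) : List Char :=
  PySem.List.pyGetD pvDigitWords ((PySem.Int.ofChars? [c]).getD 0) []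

-- on each decimal digit, A's char→word lookup agrees with B's numeric lookup
lemma pvWordOf_digitChar (d : Nat) (hd : d < 10) :
    pvWordOf (Nat.digitChar d) = PySem.List.pyGetD pvDigitWords ((d : Int)) [] := by
  interval_cases d <;> decide

-- core: A's digit-string word list equals B's reversed peel, for positive m
lemma pvToDigits_map_eq_peel (m : Nat) (hm : 0 < m) :
    (Nat.toDigits 10 m).map pvWordOf = (pvPeel (m : Int)).reverse := by
  induction m using Nat.strong_induction_on with
  | _ m ih =>
    rw [pvPeel]
    rw [if_pos (by exact_mod_cast hm : (0:Int) < (m:Int))]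
    rw [show (10:Int) = ((10:Nat):Int) from rfl,
      PySem.Int.mod_natCast m 10, PySem.Int.floordiv_natCast m 10]
    by_cases h10 : m < 10
    · rw [Nat.toDigits_of_lt_base h10]
      rw [pvPeel, if_neg (by omega : ¬ (0:Int) < ((m / 10 : Nat) : Int))]
      simp [pvWordOf_digitChar m h10, Nat.mod_eq_of_lt h10]
    · rw [Nat.toDigits_of_base_le (by omega) (by omega)]
      rw [List.map_append, ih (m / 10) (by omega) (by omega)]
      simp [pvWordOf_digitChar (m % 10) (Nat.mod_lt _ (by omega))]

-- the nonnegative case of the equivalence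
lemma pv_nonneg (n : Int) (h0 : 0 ≤ n) : get_pronounce n = get_pronounce_alt n := by
  rw [get_pronounce, get_pronounce_alt, if_neg (by omega), if_neg (by omega)]
  have hfun : (fun (words : List (List Char)) c =>
      words ++ [PySem.List.pyGetD pvDigitWords ((PySem.Int.ofChars? [c]).getD 0) []]) =
      (fun acc c => acc ++ [pvWordOf c]) := rfl
  rw [hfun, PySem.List.foldl_append_singleton_eq_map pvWordOf]
  have htc : PySem.Int.toChars n = Nat.toDigits 10 n.toNat := by
    simp [PySem.Int.toChars, not_lt.2 h0]
  rw [htc]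
  by_cases hz : n = 0
  · subst hz; decide
  · rw [if_neg hz]
    have : (0:Nat) < n.toNat := by omega
    rw [pvToDigits_map_eq_peel n.toNat this, show ((n.toNat : Int)) = n by omega, List.nil_append]

-- ===== VERDICT (by name: the statement is the Claim_ definition above) =====
theorem get_pronounce_spec : Claim_equal_get_pronounce := by
  intro n _
  unfold Spec_get_pronounce
  by_cases hn : n < 0
  · rw [get_pronounce, get_pronounce_alt, if_pos hn, if_pos hn,
      pv_nonneg (-n) (by omega)]
  · exact pv_nonneg n (by omega)
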